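-- pv_equiv track=rewrite | github.com/qwibitai/nanoclaw | scripts/workflow/render-launchd-schedule.py | schedule_string
-- ===== SOURCE A (Python) =====
-- def schedule_string(trigger: dict[str, str]) -> str:
--     ordered_keys = ["Weekday", "Day", "Hour", "Minute", "Month"]
--     parts = []
--     for key in ordered_keys:
--         if key in trigger:
--             parts.append(f"{key}={trigger[key]}")
--     for key in sorted(k for k in trigger.keys() if k not in ordered_keys):
--         parts.append(f"{key}={trigger[key]}")
--     return ", ".join(parts)
-- ===== SOURCE B (Python) =====
-- def schedule_string(trigger: dict[str, str]) -> str: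
--     ordered_keys = ["Weekday", "Day", "Hour", "Minute", "Month"]
--
--     def rank(key):
--         if key in ordered_keys:
--             return (ordered_keys.index(key), "")
--         return (len(ordered_keys), key)
--
--     return ", ".join(f"{key}={trigger[key]}" for key in sorted(trigger, key=rank))
-- ===== Notes on version B (the rewrite author's own statement) =====
-- stated objective: simpler
-- what changed: Replaces A's two separate output loops (fixed priority scan, then a sort of the leftovers) by a single sort of all keys under a composite rank -- (index, "") for priority keys, (5, key) for the rest -- followed by one formatting pass.
import Mathlib
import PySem

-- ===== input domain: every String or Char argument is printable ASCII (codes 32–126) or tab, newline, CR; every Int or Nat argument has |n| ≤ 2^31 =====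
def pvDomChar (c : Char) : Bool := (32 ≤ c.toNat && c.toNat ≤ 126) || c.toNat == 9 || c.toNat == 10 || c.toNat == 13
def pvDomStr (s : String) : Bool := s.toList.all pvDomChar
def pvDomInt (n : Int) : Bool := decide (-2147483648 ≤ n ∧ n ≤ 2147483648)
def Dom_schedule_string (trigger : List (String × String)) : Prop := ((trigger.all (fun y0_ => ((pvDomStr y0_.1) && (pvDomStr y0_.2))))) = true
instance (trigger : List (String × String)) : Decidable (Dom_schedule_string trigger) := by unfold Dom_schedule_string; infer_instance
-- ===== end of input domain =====

-- B replaces A's two separate output loops by ONE sort of all keys under a composite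
-- rank (priority keys first in their fixed order, the rest alphabetically) — objective: simpler.

-- ===== PORT A =====
def pvOrderedKeys : List String := ["Weekday", "Day", "Hour", "Minute", "Month"]

def schedule_string (trigger : List (String × String)) : String :=
  let d := PySem.Dict.ofList trigger
  let parts₁ : List String :=
    pvOrderedKeys.foldl
      (fun acc key => if d.contains key then acc ++ [key ++ "=" ++ d.getD key ""] else acc) []
  let parts₂ : List String :=
    (PySem.List.sorted (d.keys.filter (fun k => !(pvOrderedKeys.contains k))) (fun k => k) false).foldl
      (fun acc key => acc ++ [key ++ "=" ++ d.getD key ""]) parts₁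
  PySem.Str.join ", " parts₂

-- ===== PORT B =====
-- rank(key) from Source B: priority keys get (index, ""), all others (5, key)
def pvRank (key : String) : Int × String :=
  if pvOrderedKeys.contains key then (((PySem.List.index? pvOrderedKeys key).getD 0 : Nat), "")
  else ((pvOrderedKeys.length : Int), key)

def schedule_string_alt (trigger : List (String × String)) : String :=
  let d := PySem.Dict.ofList trigger
  let ks := PySem.List.sorted2 d.keys (fun k => (pvRank k).1) (fun k => (pvRank k).2) false
  PySem.Str.join ", " (ks.map (fun key => key ++ "=" ++ d.getD key ""))

-- ===== PRECONDITION & SPEC =====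
def Spec_schedule_string (trigger : List (String × String)) (out : String) : Prop := out = schedule_string_alt trigger
instance (trigger : List (String × String)) (out : String) : Decidable (Spec_schedule_string trigger out) := by unfold Spec_schedule_string; infer_instance

-- ===== CLAIM (what is proved, stated in full; the proofs are below) =====
def Claim_equal_schedule_string : Prop := ∀ (trigger : List (String × String)), Dom_schedule_string trigger → Spec_schedule_string trigger (schedule_string trigger)

-- ===== LEMMAS AND PROOFS =====

-- sorted2 with keys k1, k2 is sorted under the lexicographic composite key (Python's tuple order)
theorem pvSorted2_eq_sorted_lex {α : Type} (xs : List α) (k1 : α → Int) (k2 : α → String) :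
    PySem.List.sorted2 xs k1 k2 false
      = PySem.List.sorted xs (fun x => toLex (k1 x, k2 x)) false := by
  rw [PySem.List.sorted_eq_foldl_insertBy]
  unfold PySem.List.sorted2
  simp only [if_neg (by decide : ¬ (false = true))]
  congr 1
  funext acc x
  congr 1
  funext a b
  simp only [Prod.Lex.lt_iff]
  rcases lt_trichotomy (k1 a) (k1 b) with h | h | h
  · simp [h, not_lt_of_gt h]
  · simp [h]
  · simp [h, not_lt_of_gt h, ne_of_gt h]

theorem pvRank_of_not_mem (k : String) (h : pvOrderedKeys.contains k = false) :
    pvRank k = ((5 : Int), k) := by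
  unfold pvRank
  rw [h]
  rfl

theorem pvRank_fst_lt_of_mem (k : String) (h : k ∈ pvOrderedKeys) : (pvRank k).1 < 5 := by
  fin_cases h <;> decide

-- the single lex sort produces exactly A's order: present priority keys first, then sorted rest
theorem pvKeysEq (d : PySem.Dict String String) (hnd : d.keys.Nodup) :
    PySem.List.sorted2 d.keys (fun k => (pvRank k).1) (fun k => (pvRank k).2) false
      = pvOrderedKeys.filter (fun k => d.contains k)
        ++ PySem.List.sorted (d.keys.filter (fun k => !(pvOrderedKeys.contains k))) (fun k => k) false := by
  rw [pvSorted2_eq_sorted_lex]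
  apply PySem.List.sorted_eq_of_perm_of_pairwise_lt
  · -- permutation of d.keys
    have h1 : (pvOrderedKeys.filter (fun k => d.contains k)).Perm
        (d.keys.filter (fun k => pvOrderedKeys.contains k)) := by
      rw [List.perm_ext_iff_of_nodup ((by decide : pvOrderedKeys.Nodup).filter _) (hnd.filter _)]
      intro a
      simp only [List.mem_filter, PySem.Dict.contains_iff_mem_keys, List.contains_iff_mem]
      tauto
    have h2 : (PySem.List.sorted (d.keys.filter (fun k => !(pvOrderedKeys.contains k))) (fun k => k) false).Perm
        (d.keys.filter (fun k => !(pvOrderedKeys.contains k))) :=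
      PySem.List.sorted_perm _ _ _
    exact ((h1.append h2).trans (List.filter_append_perm _ _))
  · -- strictly increasing composite key
    rw [List.pairwise_append]
    refine ⟨?_, ?_, ?_⟩
    · -- within the priority block
      have hp : pvOrderedKeys.Pairwise
          (fun a b => toLex ((pvRank a).1, (pvRank a).2) < toLex ((pvRank b).1, (pvRank b).2)) := by
        decide
      exact hp.sublist List.filter_sublist
    · -- within the sorted remainder
      have hle := PySem.List.sorted_pairwise (d.keys.filter (fun k => !(pvOrderedKeys.contains k)))
        (fun k => k) -- Pairwise (· ≤ ·)
      have hnd2 : (PySem.List.sorted (d.keys.filter (fun k => !(pvOrderedKeys.contains k))) (fun k => k) false).Nodup :=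
        (PySem.List.sorted_perm _ _ _).symm.nodup (hnd.filter _)
      refine (hle.and hnd2).imp_of_mem ?_
      intro a b ha hb hab
      have ha' : (pvOrderedKeys.contains a) = false := by
        have := (List.mem_filter.mp ((PySem.List.sorted_perm _ _ _).mem_iff.mp ha)).2
        simpa using this
      have hb' : (pvOrderedKeys.contains b) = false := by
        have := (List.mem_filter.mp ((PySem.List.sorted_perm _ _ _).mem_iff.mp hb)).2
        simpa using this
      rw [pvRank_of_not_mem a ha', pvRank_of_not_mem b hb']
      rw [Prod.Lex.lt_iff]
      exact Or.inr ⟨rfl, lt_of_le_of_ne hab.1 hab.2⟩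
    · -- priority block before the remainder
      intro a ha b hb
      have ha' : a ∈ pvOrderedKeys := (List.mem_filter.mp ha).1
      have hb' : (pvOrderedKeys.contains b) = false := by
        have := (List.mem_filter.mp ((PySem.List.sorted_perm _ _ _).mem_iff.mp hb)).2
        simpa using this
      rw [Prod.Lex.lt_iff]
      left
      rw [pvRank_of_not_mem b hb']
      exact pvRank_fst_lt_of_mem a ha'

-- ===== VERDICT (by name: the statement is the Claim_ definition above) =====
theorem schedule_string_spec : Claim_equal_schedule_string := by
  intro trigger _
  unfold Spec_schedule_string schedule_string schedule_string_alt
  simp only [PySem.List.foldl_append_if, PySem.List.foldl_append_singleton_eq_map,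
    List.nil_append]
  rw [pvKeysEq _ (PySem.Dict.nodup_keys_ofList trigger), List.map_append]
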